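-- pv_equiv track=rewrite | github.com/paiml/depyler | examples/hard_anagram_check.py | count_matching_chars
-- ===== SOURCE A (Python) =====
-- def char_counts(s: str) -> dict[str, int]:
--     """Count occurrences of each character in a string."""
--     counts: dict[str, int] = {}
--     idx: int = 0
--     length: int = len(s)
--     while idx < length:
--         ch: str = s[idx]
--         if ch in counts:
--             counts[ch] = counts[ch] + 1
--         else:
--             counts[ch] = 1
--         idx = idx + 1
--     return counts
--
-- def count_matching_chars(a: str, b: str) -> int:
--     """Count characters in common (with multiplicity)."""
--     counts_a: dict[str, int] = char_counts(a)
--     counts_b: dict[str, int] = char_counts(b)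
--     total: int = 0
--     idx: int = 0
--     length: int = len(a)
--     while idx < length:
--         ch: str = a[idx]
--         if ch in counts_b:
--             a_count: int = counts_a[ch]
--             b_count: int = counts_b[ch]
--             if a_count < b_count:
--                 total = total + a_count
--             else:
--                 total = total + b_count
--             del counts_b[ch]
--         idx = idx + 1
--     return total
-- ===== SOURCE B (Python) =====
-- def count_matching_chars(a: str, b: str) -> int:
--     """Count characters in common (with multiplicity) via a sorted two-pointer merge."""
--     sa = sorted(a)
--     sb = sorted(b)
--     i = 0
--     j = 0
--     total = 0
--     while i < len(sa) and j < len(sb):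
--         if sa[i] == sb[j]:
--             total = total + 1
--             i = i + 1
--             j = j + 1
--         elif sa[i] < sb[j]:
--             i = i + 1
--         else:
--             j = j + 1
--     return total
-- ===== Notes on version B (the rewrite author's own statement) =====
-- stated objective: alternative
-- what changed: Replaced the two frequency dictionaries with membership test and in-place deletion by sorting both strings and counting common characters with a two-pointer merge.
import Mathlib
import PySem

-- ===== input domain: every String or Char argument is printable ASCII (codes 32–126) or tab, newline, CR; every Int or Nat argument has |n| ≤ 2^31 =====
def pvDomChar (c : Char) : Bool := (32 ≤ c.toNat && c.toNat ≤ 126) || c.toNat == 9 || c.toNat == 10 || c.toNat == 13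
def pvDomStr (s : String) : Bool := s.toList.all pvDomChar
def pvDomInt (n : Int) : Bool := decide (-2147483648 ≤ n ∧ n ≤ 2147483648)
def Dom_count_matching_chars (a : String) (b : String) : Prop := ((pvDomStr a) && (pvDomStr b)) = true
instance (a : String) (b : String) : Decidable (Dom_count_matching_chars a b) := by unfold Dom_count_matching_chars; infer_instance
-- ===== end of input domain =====

-- B replaces A's two frequency dictionaries (with deletion) by a sorted two-pointer merge; objective: alternative.

-- ===== PORT A =====
-- char_counts: build the character-count dict by one pass over s
def charCountsA (s : String) : PySem.Dict Char Int :=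
  s.toList.foldl (fun counts ch =>
    if counts.contains ch then counts.insert ch (counts.getD ch 0 + 1)
    else counts.insert ch 1) PySem.Dict.empty

-- the while loop over a's characters, carrying (total, counts_b); counts_a[ch] is ported as
-- getD (the key is always present: ch is drawn from a, so Python's counts_a[ch] never raises)
def count_matching_chars (a : String) (b : String) : Int :=
  (a.toList.foldl (fun (st : Int × PySem.Dict Char Int) ch =>
      if st.2.contains ch then
        ((if (charCountsA a).getD ch 0 < st.2.getD ch 0
          then st.1 + (charCountsA a).getD ch 0
          else st.1 + st.2.getD ch 0), st.2.erase ch)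
      else st) (0, charCountsA b)).1

-- ===== PORT B =====
-- the two-pointer merge while-loop of Source B: advancing a pointer = moving to the tail
def mergeLoop : List Char → List Char → Int → Int
  | [], _, total => total
  | _ :: _, [], total => total
  | x :: xs, y :: ys, total =>
    if x = y then mergeLoop xs ys (total + 1)
    else if x < y then mergeLoop xs (y :: ys) total
    else mergeLoop (x :: xs) ys total

def count_matching_chars_alt (a : String) (b : String) : Int :=
  mergeLoop (PySem.List.sorted a.toList (fun c => c)) (PySem.List.sorted b.toList (fun c => c)) 0

-- ===== PRECONDITION & SPEC =====
def Spec_count_matching_chars (a : String) (b : String) (out : Int) : Prop := out = count_matching_chars_alt a b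
instance (a : String) (b : String) (out : Int) : Decidable (Spec_count_matching_chars a b out) := by unfold Spec_count_matching_chars; infer_instance

-- ===== CLAIM (what is proved, stated in full; the proofs are below) =====
def Claim_equal_count_matching_chars : Prop := ∀ (a : String) (b : String), Dom_count_matching_chars a b → Spec_count_matching_chars a b (count_matching_chars a b)

-- ===== LEMMAS AND PROOFS =====

-- char_counts builds exactly collections.Counter(s)
theorem charCountsA_eq (s : String) : charCountsA s = PySem.Dict.counter s.toList := by
  rw [← PySem.Dict.foldl_insert_getD_add_one_eq_counter]
  unfold charCountsA
  congr 1
  funext d ch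
  by_cases h : d.contains ch = true
  · simp [h]
  · have h' : d.contains ch = false := by simpa using h
    rw [PySem.Dict.getD_of_not_contains d 0 h']
    simp [h']

-- erase on a dict: lookup afterwards
theorem find?_filter_key (items : List (Char × Int)) (k k' : Char) :
    ((items.filter (fun p => !(p.1 == k))).find? (fun p => p.1 == k'))
      = if k' = k then none else items.find? (fun p => p.1 == k') := by
  induction items with
  | nil => simp
  | cons p rest ih =>
    by_cases h1 : p.1 = k
    · by_cases h2 : k' = k
      · simp [h1, h2]
      · have h3 : ¬ p.1 = k' := fun h => h2 (by rw [← h, h1])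
        simp only [List.filter_cons, h1]
        simp only [BEq.rfl, Bool.not_true, Bool.false_eq_true, if_false]
        rw [ih, if_neg h2, List.find?_cons_of_neg (by simp [h3]), if_neg h2]
    · by_cases h3 : p.1 = k'
      · have h4 : ¬ k' = k := fun h => h1 (by rw [h3, h])
        simp [h3, h4]
      · simp [h1, h3, ih]

theorem dict_get?_erase (d : PySem.Dict Char Int) (k k' : Char) :
    (d.erase k).get? k' = if k' = k then none else d.get? k' := by
  obtain ⟨items⟩ := d
  simp only [PySem.Dict.erase, PySem.Dict.get?, find?_filter_key]
  by_cases h : k' = k <;> simp [h]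

theorem dict_contains_erase (d : PySem.Dict Char Int) (k k' : Char) :
    (d.erase k).contains k' = if k' = k then false else d.contains k' := by
  rw [PySem.Dict.contains_eq_isSome_get?, PySem.Dict.contains_eq_isSome_get?, dict_get?_erase]
  by_cases h : k' = k <;> simp [h]

theorem dict_getD_erase_of_ne (d : PySem.Dict Char Int) (k k' : Char) (h : k' ≠ k) :
    (d.erase k).getD k' 0 = d.getD k' 0 := by
  rw [PySem.Dict.getD_eq_get?_getD, PySem.Dict.getD_eq_get?_getD, dict_get?_erase]
  simp [h]

-- the invariant of A's main loop: d holds b-counts exactly for the keys in S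
theorem loopA_inv (cA : PySem.Dict Char Int) (al bl : List Char)
    (hA : ∀ c, cA.getD c 0 = (al.count c : Int)) :
    ∀ (l : List Char) (S : Finset Char) (d : PySem.Dict Char Int) (t : Int),
    (∀ c, d.contains c = true ↔ c ∈ S) →
    (∀ c ∈ S, d.getD c 0 = (bl.count c : Int)) →
    (l.foldl (fun (st : Int × PySem.Dict Char Int) ch =>
      if st.2.contains ch then
        ((if cA.getD ch 0 < st.2.getD ch 0
          then st.1 + cA.getD ch 0
          else st.1 + st.2.getD ch 0), st.2.erase ch)
      else st) (t, d)).1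
      = t + ∑ c ∈ l.toFinset ∩ S, min ((al.count c : Int)) ((bl.count c : Int)) := by
  intro l
  induction l with
  | nil => intro S d t _ _; simp
  | cons c cs ih =>
    intro S d t hc hg
    by_cases hmem : c ∈ S
    · have hcon : d.contains c = true := (hc c).mpr hmem
      have hbc : d.getD c 0 = (bl.count c : Int) := hg c hmem
      rw [List.foldl_cons]
      simp only [hcon, if_true]
      have harith : (if cA.getD c 0 < d.getD c 0 then t + cA.getD c 0 else t + d.getD c 0)
          = t + min ((al.count c : Int)) ((bl.count c : Int)) := by
        rw [hA c, hbc]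
        by_cases hlt : ((al.count c : Int)) < ((bl.count c : Int))
        · rw [if_pos hlt]; omega
        · rw [if_neg hlt]; omega
      rw [harith]
      rw [ih (S.erase c) (d.erase c)
          (t + min ((al.count c : Int)) ((bl.count c : Int)))
          (by
            intro x
            rw [dict_contains_erase]
            by_cases hx : x = c <;> simp [hx, hc x, hmem])
          (by
            intro x hx
            rcases Finset.mem_erase.mp hx with ⟨hne, hxS⟩
            rw [dict_getD_erase_of_ne d c x hne]
            exact hg x hxS)]
      · have hset : (c :: cs).toFinset ∩ S = insert c (cs.toFinset ∩ S.erase c) := by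
          ext x
          simp only [List.toFinset_cons, Finset.mem_inter, Finset.mem_insert,
            List.mem_toFinset, Finset.mem_erase]
          constructor
          · rintro ⟨hx, hxS⟩
            rcases hx with hx | hx
            · exact Or.inl hx
            · by_cases hxc : x = c
              · exact Or.inl hxc
              · exact Or.inr ⟨hx, hxc, hxS⟩
          · rintro (rfl | ⟨hx, _, hxS⟩)
            · exact ⟨Or.inl rfl, hmem⟩
            · exact ⟨Or.inr hx, hxS⟩
        have hnot : c ∉ cs.toFinset ∩ S.erase c := by
          simp [Finset.mem_inter, Finset.mem_erase]
        rw [hset, Finset.sum_insert hnot]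
        ring
    · have hcon : d.contains c = false := by
        have := fun h => hmem ((hc c).mp h)
        simpa using this
      rw [List.foldl_cons]
      simp only [hcon, Bool.false_eq_true, if_false]
      rw [ih S d t hc hg]
      have hset : (c :: cs).toFinset ∩ S = cs.toFinset ∩ S := by
        ext x
        simp only [List.toFinset_cons, Finset.mem_inter, Finset.mem_insert, List.mem_toFinset]
        constructor
        · rintro ⟨hx | hx, hxS⟩
          · exact absurd (hx ▸ hxS) hmem
          · exact ⟨hx, hxS⟩
        · rintro ⟨hx, hxS⟩; exact ⟨Or.inr hx, hxS⟩
      rw [hset]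

-- A computes the sum of min-counts over the common distinct characters
theorem A_eq_sum (a b : String) :
    count_matching_chars a b
      = ∑ c ∈ a.toList.toFinset ∩ b.toList.toFinset,
          min ((a.toList.count c : Int)) ((b.toList.count c : Int)) := by
  unfold count_matching_chars
  rw [charCountsA_eq, charCountsA_eq]
  rw [loopA_inv (PySem.Dict.counter a.toList) a.toList b.toList
      (fun c => PySem.Dict.getD_counter a.toList c)
      a.toList b.toList.toFinset (PySem.Dict.counter b.toList) 0
      (by intro c; rw [PySem.Dict.contains_counter]; simp)
      (by intro c _; exact PySem.Dict.getD_counter b.toList c)]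
  ring

-- multiset helpers for the merge
theorem inter_cons_cons (x : Char) (s t : Multiset Char) :
    (x ::ₘ s) ∩ (x ::ₘ t) = x ::ₘ (s ∩ t) := by
  ext a
  simp only [Multiset.count_inter, Multiset.count_cons]
  by_cases h : a = x
  · simp only [h]
    omega
  · simp [h]

theorem cons_inter_of_not_mem (x : Char) (s t : Multiset Char) (h : x ∉ t) :
    (x ::ₘ s) ∩ t = s ∩ t := by
  ext a
  simp only [Multiset.count_inter, Multiset.count_cons]
  by_cases hax : a = x
  · subst hax
    rw [Multiset.count_eq_zero.mpr h]
    simp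
  · simp [hax]

theorem inter_cons_of_not_mem (y : Char) (s t : Multiset Char) (h : y ∉ s) :
    s ∩ (y ::ₘ t) = s ∩ t := by
  ext a
  simp only [Multiset.count_inter, Multiset.count_cons]
  by_cases hay : a = y
  · subst hay
    rw [Multiset.count_eq_zero.mpr h]
    simp
  · simp [hay]

-- the merge loop on two sorted lists counts the multiset intersection
theorem mergeLoop_eq : ∀ (la lb : List Char) (t : Int),
    la.Pairwise (· ≤ ·) → lb.Pairwise (· ≤ ·) →
    mergeLoop la lb t = t + (((la : Multiset Char) ∩ (lb : Multiset Char)).card : Int) := by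
  intro la
  induction la with
  | nil => intro lb t _ _; simp [mergeLoop]
  | cons x xs ihx =>
    intro lb
    induction lb with
    | nil => intro t _ _; simp [mergeLoop]
    | cons y ys ihy =>
      intro t ha hb
      rcases List.pairwise_cons.mp ha with ⟨hxall, hxs⟩
      rcases List.pairwise_cons.mp hb with ⟨hyall, hys⟩
      by_cases h1 : x = y
      · subst h1
        rw [show mergeLoop (x :: xs) (x :: ys) t = mergeLoop xs ys (t + 1) from by
              simp [mergeLoop]]
        rw [ihx ys (t + 1) hxs hys]
        rw [show ((x :: xs : List Char) : Multiset Char) = x ::ₘ (xs : Multiset Char) from rfl,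
            show ((x :: ys : List Char) : Multiset Char) = x ::ₘ (ys : Multiset Char) from rfl,
            inter_cons_cons, Multiset.card_cons]
        push_cast
        ring
      · by_cases h2 : x < y
        · rw [show mergeLoop (x :: xs) (y :: ys) t = mergeLoop xs (y :: ys) t from by
                simp [mergeLoop, h1, h2]]
          rw [ihx (y :: ys) t hxs hb]
          have hxnot : x ∉ ((y :: ys : List Char) : Multiset Char) := by
            simp only [Multiset.mem_coe, List.mem_cons]
            rintro (rfl | hx)
            · exact h1 rfl
            · exact absurd (lt_of_lt_of_le h2 (hyall x hx)) (lt_irrefl x)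
          rw [show ((x :: xs : List Char) : Multiset Char) = x ::ₘ (xs : Multiset Char) from rfl,
              cons_inter_of_not_mem x _ _ hxnot]
        · have hyx : y < x := lt_of_le_of_ne (not_lt.mp h2) (fun h => h1 h.symm)
          rw [show mergeLoop (x :: xs) (y :: ys) t = mergeLoop (x :: xs) ys t from by
                simp [mergeLoop, h1, h2]]
          rw [ihy t ha hys]
          have hynot : y ∉ ((x :: xs : List Char) : Multiset Char) := by
            simp only [Multiset.mem_coe, List.mem_cons]
            rintro (rfl | hy)
            · exact h1 rfl
            · exact absurd (lt_of_lt_of_le hyx (hxall y hy)) (lt_irrefl y)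
          rw [show ((y :: ys : List Char) : Multiset Char) = y ::ₘ (ys : Multiset Char) from rfl,
              inter_cons_of_not_mem y _ _ hynot]

-- B computes the cardinality of the multiset intersection
theorem B_eq_card (a b : String) :
    count_matching_chars_alt a b
      = (((a.toList : Multiset Char) ∩ (b.toList : Multiset Char)).card : Int) := by
  unfold count_matching_chars_alt
  rw [mergeLoop_eq _ _ 0
      (PySem.List.sorted_pairwise a.toList (fun c => c))
      (PySem.List.sorted_pairwise b.toList (fun c => c))]
  rw [Multiset.coe_eq_coe.mpr (PySem.List.sorted_perm a.toList (fun c => c) false),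
      Multiset.coe_eq_coe.mpr (PySem.List.sorted_perm b.toList (fun c => c) false)]
  ring

-- the bridge: intersection cardinality = sum of min-counts over common distinct chars
theorem card_inter_eq_sum (al bl : List Char) :
    (((al : Multiset Char) ∩ (bl : Multiset Char)).card : Int)
      = ∑ c ∈ al.toFinset ∩ bl.toFinset, min ((al.count c : Int)) ((bl.count c : Int)) := by
  rw [← Multiset.toFinset_sum_count_eq ((al : Multiset Char) ∩ (bl : Multiset Char))]
  rw [Multiset.toFinset_inter]
  have h1 : (al : Multiset Char).toFinset = al.toFinset := rfl
  have h2 : (bl : Multiset Char).toFinset = bl.toFinset := rfl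
  rw [h1, h2]
  push_cast
  apply Finset.sum_congr rfl
  intro c _
  rw [Multiset.count_inter]
  push_cast
  simp [Multiset.coe_count]

-- ===== VERDICT (by name: the statement is the Claim_ definition above) =====
theorem count_matching_chars_spec : Claim_equal_count_matching_chars := by
  intro a b _
  unfold Spec_count_matching_chars
  rw [A_eq_sum, B_eq_card, card_inter_eq_sum]
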